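-- pv_equiv track=rewrite | github.com/ihgazni2/dlixhict-didactic | xdict/elist.py | first_continuous_indexesnot_slice
-- ===== SOURCE A (Python) =====
-- def first_continuous_indexesnot_slice(ol,value):
--     '''
--         from xdict.elist import *
--         ol = ["a",0,1,"a","a",2,3,"a",4,"a","a","a",5]
--         first_continuous_indexesnot_slice(ol,"a")
--     '''
--     length = ol.__len__()
--     begin = None
--     slice = []
--     for i in range(0,length):
--         if(not(ol[i]==value)):
--             begin = i
--             break
--         else:
--             pass
--     if(begin == None):
--         return(None)
--     else:
--         slice.append(begin)
--         for i in range(begin+1,length):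
--             if(not(ol[i]==value)):
--                 slice.append(i)
--             else:
--                 break
--     return(slice)
-- ===== SOURCE B (Python) =====
-- def first_continuous_indexesnot_slice(ol, value):
--     # Pass 1: run-length encode the boolean profile (x == value) into (key, count) runs.
--     runs = []
--     cur = None
--     for x in ol:
--         k = (x == value)
--         if cur is None:
--             cur = (k, 1)
--         elif cur[0] == k:
--             cur = (k, cur[1] + 1)
--         else:
--             runs.append(cur)
--             cur = (k, 1)
--     if cur is not None:
--         runs.append(cur)
--     # Pass 2: scan the run list for the first non-value run.
--     pos = 0
--     for k, n in runs:
--         if not k: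
--             return list(range(pos, pos + n))
--         pos += n
--     return None
-- ===== Notes on version B (the rewrite author's own statement) =====
-- stated objective: alternative
-- what changed: B run-length encodes the boolean profile (x == value) into a list of (key, count) runs in one pass and then scans that run list for the first non-value run, instead of A's two index loops that locate the run's begin and append its indices one by one.
import Mathlib
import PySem

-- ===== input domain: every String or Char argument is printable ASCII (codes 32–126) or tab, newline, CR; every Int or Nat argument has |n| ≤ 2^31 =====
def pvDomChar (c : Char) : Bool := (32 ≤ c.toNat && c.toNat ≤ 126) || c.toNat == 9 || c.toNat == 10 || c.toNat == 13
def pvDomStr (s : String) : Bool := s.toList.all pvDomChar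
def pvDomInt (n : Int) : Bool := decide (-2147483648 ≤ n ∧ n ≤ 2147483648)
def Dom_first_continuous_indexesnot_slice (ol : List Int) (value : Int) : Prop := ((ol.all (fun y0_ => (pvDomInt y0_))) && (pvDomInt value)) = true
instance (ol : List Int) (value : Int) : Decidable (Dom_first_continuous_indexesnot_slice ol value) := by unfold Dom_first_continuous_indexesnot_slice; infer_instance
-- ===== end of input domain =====

-- B replaces A's two index scans by a run-length encoding of the (x == value) profile followed by a scan of the run list; same O(n) cost (objective: alternative).
-- ===== PORT A =====
-- A's first loop: scan for the first index with ol[i] != value (break = stop recursing).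
def pvA_findBegin (xs : List Int) (value : Int) (i : Nat) : Option Nat :=
  match xs with
  | [] => none
  | x :: rest => if ¬ (x = value) then some i else pvA_findBegin rest value (i + 1)

-- A's second loop: append indexes while ol[i] != value, break at the first match.
def pvA_collect (xs : List Int) (value : Int) (i : Nat) : List Int :=
  match xs with
  | [] => []
  | x :: rest => if ¬ (x = value) then Int.ofNat i :: pvA_collect rest value (i + 1) else []

def first_continuous_indexesnot_slice (ol : List Int) (value : Int) : Option (List Int) :=
  match pvA_findBegin ol value 0 with
  | none => none
  | some b => some (Int.ofNat b :: pvA_collect (ol.drop (b + 1)) value (b + 1))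

-- ===== PORT B =====
-- B pass 1 body: fold over ol with state (completed runs, open run cur).
def pvB_step (value : Int) : (List (Bool × Nat) × Option (Bool × Nat)) → Int → (List (Bool × Nat) × Option (Bool × Nat))
  | (runs, cur), x =>
    let k := (x == value)
    match cur with
    | none => (runs, some (k, 1))
    | some (k', n) => if k' == k then (runs, some (k', n + 1)) else (runs ++ [(k', n)], some (k, 1))

-- B pass 2: scan the run list for the first non-value run, tracking the start position.
def pvB_scan : List (Bool × Nat) → Nat → Option (List Int)
  | [], _ => none
  | (k, n) :: rest, pos => if k then pvB_scan rest (pos + n) else some ((List.range' pos n).map Int.ofNat)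

def first_continuous_indexesnot_slice_alt (ol : List Int) (value : Int) : Option (List Int) :=
  let st := ol.foldl (pvB_step value) ([], none)
  let runs := match st.2 with | none => st.1 | some c => st.1 ++ [c]
  pvB_scan runs 0

-- ===== PRECONDITION & SPEC =====
def Spec_first_continuous_indexesnot_slice (ol : List Int) (value : Int) (out : Option (List Int)) : Prop := out = first_continuous_indexesnot_slice_alt ol value
instance (ol : List Int) (value : Int) (out : Option (List Int)) : Decidable (Spec_first_continuous_indexesnot_slice ol value out) := by unfold Spec_first_continuous_indexesnot_slice; infer_instance

-- ===== CLAIM (what is proved, stated in full; the proofs are below) =====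
def Claim_equal_first_continuous_indexesnot_slice : Prop := ∀ (ol : List Int) (value : Int), Dom_first_continuous_indexesnot_slice ol value → Spec_first_continuous_indexesnot_slice ol value (first_continuous_indexesnot_slice ol value)

-- ===== LEMMAS AND PROOFS =====

-- Functional view of B's pass-1 fold: the run list produced from open run cur over the rest of the input.
def pvG (value : Int) : Option (Bool × Nat) → List Int → List (Bool × Nat)
  | none, [] => []
  | some c, [] => [c]
  | none, x :: t => pvG value (some ((x == value), 1)) t
  | some (k', n), x :: t =>
      if k' == (x == value) then pvG value (some (k', n + 1)) t
      else (k', n) :: pvG value (some ((x == value), 1)) t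

theorem pvB_foldl_eq (value : Int) (t : List Int) (runs : List (Bool × Nat)) (cur : Option (Bool × Nat)) :
    (match (t.foldl (pvB_step value) (runs, cur)).2 with
     | none => (t.foldl (pvB_step value) (runs, cur)).1
     | some c => (t.foldl (pvB_step value) (runs, cur)).1 ++ [c]) = runs ++ pvG value cur t := by
  induction t generalizing runs cur with
  | nil => cases cur <;> simp [pvG]
  | cons x t ih =>
    rcases cur with _ | ⟨k', n⟩
    · simp only [List.foldl_cons, pvB_step, pvG]
      exact ih runs (some ((x == value), 1))
    · simp only [List.foldl_cons, pvB_step, pvG]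
      by_cases h : (k' == (x == value)) = true
      · simp only [if_pos h]
        exact ih runs (some (k', n + 1))
      · simp only [if_neg h]
        rw [ih (runs ++ [(k', n)]) (some ((x == value), 1))]
        simp

-- shifting a range of casted indices
theorem range'_map_shift (a b m : Nat) :
    ((List.range' a m).map Int.ofNat).map (fun z => z + Int.ofNat b) = (List.range' (a + b) m).map Int.ofNat := by
  induction m generalizing a with
  | zero => simp
  | succ m ih =>
    rw [List.range'_succ, List.range'_succ, List.map_cons, List.map_cons, ih (a + 1),
      show a + 1 + b = a + b + 1 from by omega, List.map_cons]
    congr 1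

theorem pvA_findBegin_shift (xs : List Int) (value : Int) (i : Nat) :
    pvA_findBegin xs value i = (pvA_findBegin xs value 0).map (· + i) := by
  induction xs generalizing i with
  | nil => simp [pvA_findBegin]
  | cons x t ih =>
    by_cases h : x = value
    · simp only [pvA_findBegin, h, not_true, if_false]
      rw [ih (i + 1), ih 1]
      cases pvA_findBegin t value 0 with
      | none => simp
      | some b =>
        simp
        omega
    · simp [pvA_findBegin, h]

-- A's second loop is a range of casted indices whose length is the non-value prefix of xs.
theorem pvA_collect_eq (xs : List Int) (value : Int) (i : Nat) :
    pvA_collect xs value i = (List.range' i ((xs.takeWhile (fun x => !(x == value))).length)).map Int.ofNat := by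
  induction xs generalizing i with
  | nil => simp [pvA_collect]
  | cons x t ih =>
    by_cases h : x = value
    · have hx : (x == value) = true := by simp [h]
      simp [pvA_collect, h]
    · have hx : (x == value) = false := by simp [h]
      rw [show pvA_collect (x :: t) value i = Int.ofNat i :: pvA_collect t value (i + 1) from by
        simp [pvA_collect, h]]
      rw [ih (i + 1), List.takeWhile_cons, hx]
      simp [List.range'_succ]

-- A on a cons whose head equals value: shift by one.
theorem pvA_cons_v (t : List Int) (value : Int) :
    first_continuous_indexesnot_slice (value :: t) value
      = (first_continuous_indexesnot_slice t value).map (List.map (fun z => z + (1 : Int))) := by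
  unfold first_continuous_indexesnot_slice
  simp only [pvA_findBegin, not_true, if_false]
  rw [pvA_findBegin_shift t value 1]
  cases hb : pvA_findBegin t value 0 with
  | none => simp
  | some b =>
    simp only [Option.map_some, Option.some.injEq, List.map_cons]
    rw [List.drop_succ_cons, pvA_collect_eq, pvA_collect_eq,
      show ((1 : Int) = Int.ofNat 1) from rfl, range'_map_shift]
    congr 1

-- A on a cons whose head differs from value.
theorem pvA_cons_ne (x : Int) (t : List Int) (value : Int) (h : ¬ x = value) :
    first_continuous_indexesnot_slice (x :: t) value = some (0 :: pvA_collect t value 1) := by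
  unfold first_continuous_indexesnot_slice
  simp [pvA_findBegin, h]

-- scanning from an open non-value run of length n at position pos
theorem pvB_scan_false (value : Int) (t : List Int) (pos n : Nat) :
    pvB_scan (pvG value (some (false, n)) t) pos
      = some ((List.range' pos (n + (t.takeWhile (fun x => !(x == value))).length)).map Int.ofNat) := by
  induction t generalizing pos n with
  | nil => simp [pvG, pvB_scan]
  | cons x t ih =>
    by_cases h : x = value
    · have hx : (x == value) = true := by simp [h]
      simp [pvG, hx, pvB_scan]
    · have hx : (x == value) = false := by simp [h]
      rw [show pvG value (some (false, n)) (x :: t) = pvG value (some (false, n + 1)) t from by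
        simp [pvG, hx]]
      rw [ih pos (n + 1), List.takeWhile_cons, hx]
      simp only [Bool.not_false, if_true, List.length_cons]
      rw [show n + 1 + (t.takeWhile (fun x => !(x == value))).length
            = n + ((t.takeWhile (fun x => !(x == value))).length + 1) from by omega]

-- scanning from an open value run of length n at position pos equals A on the rest, shifted by pos + n
theorem pvB_scan_true (value : Int) (t : List Int) (pos n : Nat) :
    pvB_scan (pvG value (some (true, n)) t) pos
      = (first_continuous_indexesnot_slice t value).map (List.map (fun z => z + Int.ofNat (pos + n))) := by
  induction t generalizing pos n with
  | nil => simp [pvG, pvB_scan, first_continuous_indexesnot_slice, pvA_findBegin]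
  | cons x t ih =>
    by_cases h : x = value
    · subst h
      rw [show pvG x (some (true, n)) (x :: t) = pvG x (some (true, n + 1)) t from by
        simp [pvG]]
      rw [ih pos (n + 1), pvA_cons_v]
      cases first_continuous_indexesnot_slice t x with
      | none => simp
      | some r =>
        simp only [Option.map_some, Option.some.injEq, List.map_map]
        apply List.map_congr_left
        intro z _
        simp only [Function.comp_apply]
        simp only [Int.ofNat_eq_natCast]
        push_cast
        ring
    · have hx : (x == value) = false := by simp [h]
      rw [show pvG value (some (true, n)) (x :: t)
            = (true, n) :: pvG value (some (false, 1)) t from by simp [pvG, hx]]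
      rw [show pvB_scan ((true, n) :: pvG value (some (false, 1)) t) pos
            = pvB_scan (pvG value (some (false, 1)) t) (pos + n) from by simp [pvB_scan]]
      rw [pvB_scan_false value t (pos + n) 1, pvA_cons_ne x t value h]
      simp only [Option.map_some, Option.some.injEq, List.map_cons, pvA_collect_eq]
      rw [show (1 + (t.takeWhile (fun x => !(x == value))).length
            = (t.takeWhile (fun x => !(x == value))).length + 1) from by omega,
        List.range'_succ, List.map_cons, range'_map_shift 1 (pos + n),
        show 1 + (pos + n) = pos + n + 1 from by omega]
      congr 1
      simp

-- ===== VERDICT (by name: the statement is the Claim_ definition above) =====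
theorem first_continuous_indexesnot_slice_spec : Claim_equal_first_continuous_indexesnot_slice := by
  intro ol value _
  unfold Spec_first_continuous_indexesnot_slice
  show first_continuous_indexesnot_slice ol value = first_continuous_indexesnot_slice_alt ol value
  show first_continuous_indexesnot_slice ol value
    = pvB_scan (match (ol.foldl (pvB_step value) ([], none)).2 with
        | none => (ol.foldl (pvB_step value) ([], none)).1
        | some c => (ol.foldl (pvB_step value) ([], none)).1 ++ [c]) 0
  rw [pvB_foldl_eq value ol [] none]
  rw [show ([] : List (Bool × Nat)) ++ pvG value none ol = pvG value none ol from by simp]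
  cases ol with
  | nil => simp [pvG, pvB_scan, first_continuous_indexesnot_slice, pvA_findBegin]
  | cons x t =>
    rw [show pvG value none (x :: t) = pvG value (some ((x == value), 1)) t from rfl]
    by_cases h : x = value
    · have hx : (x == value) = true := by simp [h]
      rw [hx, pvB_scan_true value t 0 1, h, pvA_cons_v]
      rfl
    · have hx : (x == value) = false := by simp [h]
      rw [hx, pvB_scan_false value t 0 1, pvA_cons_ne x t value h, pvA_collect_eq]
      rw [show (1 + (t.takeWhile (fun x => !(x == value))).length
            = (t.takeWhile (fun x => !(x == value))).length + 1) from by omega,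
        List.range'_succ, List.map_cons]
      rfl
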